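-- pv_equiv track=rewrite | github.com/KevWald/BRGaitLab | GaitViewerAppv1.py | compress_repeats_with_index
-- ===== SOURCE A (Python) =====
-- def compress_repeats_with_index(lst):
--     if not lst:
--         return [], []
--     compressed, indices = [lst[0]], [0]
--     for i in range(1, len(lst)):
--         if lst[i] != compressed[-1]:
--             compressed.append(lst[i])
--             indices.append(i)
--     return compressed, indices
-- ===== SOURCE B (Python) =====
-- def compress_repeats_with_index(lst):
--     # run-skipping two-pointer scan: jump from run start to run start
--     compressed, indices = [], []
--     i, n = 0, len(lst)
--     while i < n:
--         compressed.append(lst[i])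
--         indices.append(i)
--         j = i + 1
--         while j < n and lst[j] == lst[i]:
--             j += 1
--         i = j
--     return compressed, indices
-- ===== Notes on version B (the rewrite author's own statement) =====
-- stated objective: alternative
-- what changed: Replaces A's element-by-element scan comparing each lst[i] to compressed[-1] with a run-skipping two-pointer loop that jumps from run start to run start, appending (value, index) once per run and never inspecting the output list.
import Mathlib
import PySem

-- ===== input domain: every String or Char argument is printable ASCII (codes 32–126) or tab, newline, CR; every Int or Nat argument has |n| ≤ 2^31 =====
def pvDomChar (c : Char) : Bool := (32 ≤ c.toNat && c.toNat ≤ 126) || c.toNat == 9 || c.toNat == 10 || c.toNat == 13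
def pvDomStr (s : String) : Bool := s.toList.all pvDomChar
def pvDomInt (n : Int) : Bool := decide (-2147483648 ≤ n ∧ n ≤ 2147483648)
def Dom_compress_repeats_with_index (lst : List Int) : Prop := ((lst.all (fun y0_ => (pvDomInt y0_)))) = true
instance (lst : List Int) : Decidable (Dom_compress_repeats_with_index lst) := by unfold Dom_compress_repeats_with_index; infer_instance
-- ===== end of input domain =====

-- B replaces A's element-by-element compare-with-last scan by a run-skipping two-pointer
-- scan (jump from run start to run start); objective: alternative structure, same cost.

-- ===== PORT A =====
-- literal port of A: early return on [], then fold over range(1, len(lst)) appending when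
-- lst[i] != compressed[-1]; both indices are always in range here, so pyGetD's default is never read
def compress_repeats_with_index (lst : List Int) : List Int × List Int :=
  match lst with
  | [] => ([], [])
  | x :: _ =>
    (PySem.List.pyRange 1 (PySem.List.len lst) 1).foldl
      (fun (st : List Int × List Int) i =>
        if PySem.List.pyGetD lst i 0 ≠ PySem.List.pyGetD st.1 (-1) 0 then
          (st.1 ++ [PySem.List.pyGetD lst i 0], st.2 ++ [i])
        else st)
      ([x], [0])

-- ===== PORT B =====
-- inner while loop of Source B: skip past the elements equal to x, returning the rest and the next index
def pvSkipRun (x : Int) : List Int → Int → List Int × Int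
  | [], j => ([], j)
  | y :: ys, j => if y = x then pvSkipRun x ys (j + 1) else (y :: ys, j)

theorem pvSkipRun_fst_length_le (x : Int) (ys : List Int) :
    ∀ j, (pvSkipRun x ys j).1.length ≤ ys.length := by
  induction ys with
  | nil => intro j; simp [pvSkipRun]
  | cons y ys ih =>
    intro j
    simp only [pvSkipRun]
    split
    · exact le_trans (ih _) (by simp)
    · simp

-- outer while loop of Source B as structural recursion on the remaining suffix (i = its start index)
def pvAltGo : List Int → Int → List Int × List Int
  | [], _ => ([], [])
  | x :: xs, i =>
    let p := pvSkipRun x xs (i + 1)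
    let r := pvAltGo p.1 p.2
    (x :: r.1, i :: r.2)
termination_by l _ => l.length
decreasing_by
  exact Nat.lt_succ_of_le (pvSkipRun_fst_length_le x xs (i + 1))

def compress_repeats_with_index_alt (lst : List Int) : List Int × List Int :=
  pvAltGo lst 0

-- ===== PRECONDITION & SPEC =====
def Spec_compress_repeats_with_index (lst : List Int) (out : List Int × List Int) : Prop := out = compress_repeats_with_index_alt lst
instance (lst : List Int) (out : List Int × List Int) : Decidable (Spec_compress_repeats_with_index lst out) := by unfold Spec_compress_repeats_with_index; infer_instance

-- ===== CLAIM (what is proved, stated in full; the proofs are below) =====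
def Claim_equal_compress_repeats_with_index : Prop := ∀ (lst : List Int), Dom_compress_repeats_with_index lst → Spec_compress_repeats_with_index lst (compress_repeats_with_index lst)

-- ===== LEMMAS AND PROOFS =====

-- reference recursion: process the suffix element by element, carrying the last kept value l
-- and the current absolute index i (the common shape of both loops)
def pvGo : Int → Int → List Int → List Int × List Int
  | _, _, [] => ([], [])
  | l, i, y :: ys =>
    if y ≠ l then (y :: (pvGo y (i + 1) ys).1, i :: (pvGo y (i + 1) ys).2)
    else pvGo l (i + 1) ys

theorem pv_last (c : List Int) (l : Int) (h : c.getLast? = some l) :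
    PySem.List.pyGetD c (-1) 0 = l := by
  have hc : c ≠ [] := by rintro rfl; simp at h
  rw [PySem.List.pyGetD_neg_one c 0 hc]
  simpa [List.getLast?_eq_some_getLast, hc] using h

theorem pv_get (lst : List Int) (a y : Int) (ys : List Int) (h0 : 0 ≤ a)
    (h : lst.drop a.toNat = y :: ys) : PySem.List.pyGetD lst a 0 = y := by
  have hlt : a.toNat < lst.length := by
    by_contra hge
    rw [List.drop_eq_nil_of_le (by omega)] at h; simp at h
  rw [PySem.List.pyGetD_eq_getElem (h0 := h0) (h1 := by omega)]
  have h2 : lst[a.toNat + 0]'(by omega) = (lst.drop a.toNat)[0]'(by simp [h]) :=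
    (List.getElem_drop ..).symm
  simp only [Nat.add_zero] at h2
  rw [h2]; simp [h]

-- A's fold over range(a, len(lst)) equals pvGo on the corresponding suffix
theorem pv_foldA (lst : List Int) (ys : List Int) :
    ∀ (a : Int) (c ix : List Int) (l : Int), 0 ≤ a → lst.drop a.toNat = ys →
    c.getLast? = some l →
    (PySem.List.pyRange a (PySem.List.len lst) 1).foldl
      (fun (st : List Int × List Int) i =>
        if PySem.List.pyGetD lst i 0 ≠ PySem.List.pyGetD st.1 (-1) 0 then
          (st.1 ++ [PySem.List.pyGetD lst i 0], st.2 ++ [i])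
        else st)
      (c, ix)
    = (c ++ (pvGo l a ys).1, ix ++ (pvGo l a ys).2) := by
  induction ys generalizing lst with
  | nil =>
    intro a c ix l h0 hdrop _
    have hle : lst.length ≤ a.toNat := by
      by_contra hlt
      have := List.drop_eq_nil_iff.mp hdrop
      omega
    rw [PySem.List.pyRange_one_eq_nil (by simp [PySem.List.len_eq]; omega)]
    simp [pvGo]
  | cons y ys ih =>
    intro a c ix l h0 hdrop hlast
    have hlt : a.toNat < lst.length := by
      by_contra hge
      rw [List.drop_eq_nil_of_le (by omega)] at hdrop; simp at hdrop
    rw [PySem.List.pyRange_one_cons (by simp [PySem.List.len_eq]; omega)]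
    rw [List.foldl_cons]
    have hy : PySem.List.pyGetD lst a 0 = y := pv_get lst a y ys h0 hdrop
    have hl : PySem.List.pyGetD c (-1) 0 = l := pv_last c l hlast
    have hdrop' : lst.drop (a + 1).toNat = ys := by
      have : (a + 1).toNat = a.toNat + 1 := by omega
      rw [this, ← List.drop_drop, hdrop]; simp
    by_cases hyl : y = l
    · simp only [hy, hl, hyl, ne_eq, not_true_eq_false, if_false]
      rw [ih lst (a + 1) c ix l (by omega) hdrop' hlast]
      simp [pvGo]
    · simp only [hy, hl, ne_eq, hyl, not_false_eq_true, if_pos]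
      rw [ih lst (a + 1) (c ++ [y]) (ix ++ [a]) y (by omega) hdrop'
        (by simp)]
      simp [pvGo, hyl, List.append_assoc]

-- B's run-skipping recursion equals pvGo
theorem pv_go_eq_alt : ∀ (n : Nat) (ys : List Int), ys.length ≤ n → ∀ (x j : Int),
    pvGo x j ys = pvAltGo (pvSkipRun x ys j).1 (pvSkipRun x ys j).2 := by
  intro n
  induction n with
  | zero =>
    intro ys hlen x j
    have : ys = [] := List.eq_nil_of_length_eq_zero (by omega)
    subst this
    simp [pvGo, pvSkipRun, pvAltGo]
  | succ n ih =>
    intro ys hlen x j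
    match ys with
    | [] => simp [pvGo, pvSkipRun, pvAltGo]
    | y :: ys' =>
      simp only [List.length_cons] at hlen
      by_cases hyx : y = x
      · simp only [pvSkipRun, pvGo, hyx, ne_eq, not_true_eq_false, if_false, if_true]
        exact ih ys' (by omega) x (j + 1)
      · simp only [pvSkipRun, if_neg hyx]
        rw [pvAltGo]
        simp only [pvGo, ne_eq, hyx, not_false_eq_true, if_pos]
        rw [ih ys' (by omega) y (j + 1)]

-- ===== VERDICT (by name: the statement is the Claim_ definition above) =====
theorem compress_repeats_with_index_spec : Claim_equal_compress_repeats_with_index := by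
  intro lst _
  unfold Spec_compress_repeats_with_index
  match lst with
  | [] => simp [compress_repeats_with_index, compress_repeats_with_index_alt, pvAltGo]
  | x :: xs =>
    show (List.foldl _ ([x], [0]) _) = _
    unfold compress_repeats_with_index_alt
    rw [pv_foldA (x :: xs) xs 1 [x] [0] x (by omega) (by simp) (by simp)]
    rw [pvAltGo]
    simp only [List.singleton_append]
    rw [pv_go_eq_alt xs.length xs le_rfl x 1]
    norm_num
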